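-- pv_equiv track=rewrite | github.com/GAUTAM-2024/Jewel_Data_Extraction | extractionv3.py | extract_img_sources
-- ===== SOURCE A (Python) =====
-- def normalize(u: str) -> str:
--     return "https:" + u if u.startswith("//") else u
--
-- def parse_srcset(attr: str):
--     variants = []
--     if not attr:
--         return variants
--     # srcset format: url widthDescriptor (comma separated)
--     for part in attr.split(','):
--         part = part.strip()
--         if not part:
--             continue
--         if ' ' in part:
--             url_part, width_part = part.rsplit(' ', 1)
--         else:
--             url_part, width_part = part, ''
--         url_part = url_part.strip()
--         width = 0
--         if width_part.endswith('w'):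
--             try:
--                 width = int(width_part[:-1])
--             except ValueError:
--                 width = 0
--         variants.append((normalize(url_part), width))
--     return variants
--
-- def choose_best_variant(img_tag) -> str:
--     srcset = img_tag.get('srcset') or img_tag.get('dt')  # some themes use custom attrs
--     variants = parse_srcset(srcset)
--     if variants:
--         # pick highest width (fallback to non-zero width preference)
--         variants.sort(key=lambda x: x[1], reverse=True)
--         return variants[0][0]
--     # fallback to src
--     src = img_tag.get('src')
--     if not src:
--         return ''
--     return normalize(src)
--
-- def extract_img_sources(img_tag, high_res: bool):
--     # ordered fallbacks
--     candidates = []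
--     if high_res:
--         best = choose_best_variant(img_tag)
--         if best:
--             candidates.append(best)
--     # raw attributes that may hold small or lazy srcs
--     for attr in ["src", "data-src", "data-msrc", "d-src"]:
--         val = img_tag.get(attr)
--         if val:
--             candidates.append(normalize(val))
--     # de-duplicate preserve order
--     seen_local = set()
--     ordered = []
--     for c in candidates:
--         if c.startswith("data:"):
--             continue
--         if c not in seen_local:
--             seen_local.add(c)
--             ordered.append(c)
--     return ordered
-- ===== SOURCE B (Python) =====
-- def normalize(u: str) -> str:
--     return "https:" + u if u.startswith("//") else u
--
-- def _parse_part(raw):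
--     part = raw.strip()
--     if not part:
--         return None
--     if ' ' in part:
--         url_part, width_part = part.rsplit(' ', 1)
--     else:
--         url_part, width_part = part, ''
--     width = 0
--     if width_part.endswith('w'):
--         try:
--             width = int(width_part[:-1])
--         except ValueError:
--             width = 0
--     return (normalize(url_part.strip()), width)
--
-- def _best_variant(img_tag) -> str:
--     attr = img_tag.get('srcset') or img_tag.get('dt')
--     best = None
--     if attr:
--         for raw in attr.split(','):
--             v = _parse_part(raw)
--             if v is None:
--                 continue
--             if best is None or best[1] < v[1]:
--                 best = v  # strict '<' keeps the first variant of maximal width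
--     if best is not None:
--         return best[0]
--     src = img_tag.get('src')
--     return normalize(src) if src else ''
--
-- def extract_img_sources(img_tag, high_res: bool):
--     candidates = [normalize(v) for a in ("src", "data-src", "data-msrc", "d-src")
--                   if (v := img_tag.get(a))]
--     if high_res:
--         b = _best_variant(img_tag)
--         if b:
--             candidates.insert(0, b)
--     ordered = []
--     for c in candidates:
--         if not c.startswith("data:") and c not in ordered:
--             ordered.append(c)
--     return ordered
-- ===== Notes on version B (the rewrite author's own statement) =====
-- stated objective: simpler
-- what changed: The best srcset variant is now found by a single running-best scan (strict '<' keeps the first maximum) instead of materialising a variants list and stable-reverse-sorting it; the candidate list is built by a comprehension and deduplicated by direct membership in the output list instead of a separate seen-set.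
import Mathlib
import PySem

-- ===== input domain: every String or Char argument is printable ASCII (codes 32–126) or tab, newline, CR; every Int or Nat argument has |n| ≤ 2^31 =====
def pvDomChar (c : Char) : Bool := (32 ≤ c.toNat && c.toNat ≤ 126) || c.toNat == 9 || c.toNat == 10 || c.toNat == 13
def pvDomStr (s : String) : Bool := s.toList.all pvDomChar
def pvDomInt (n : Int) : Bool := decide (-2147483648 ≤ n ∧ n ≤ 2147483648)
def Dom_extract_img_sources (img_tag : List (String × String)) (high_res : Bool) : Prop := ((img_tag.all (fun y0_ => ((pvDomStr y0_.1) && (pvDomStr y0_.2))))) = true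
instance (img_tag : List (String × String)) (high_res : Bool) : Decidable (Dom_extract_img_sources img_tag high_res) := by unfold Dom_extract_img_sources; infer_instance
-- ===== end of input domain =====

-- B finds the best srcset variant with a single running-best scan instead of sorting the
-- variants, builds the candidate list by filterMap instead of a conditional-append loop, and
-- deduplicates by membership in the output list instead of a separate seen-set (simpler).


-- shared with B: dict lookup (association list, first match) and the identical `normalize` helper
def pvGet (d : List (String × String)) (k : String) : Option String :=
  (d.find? (fun kv => kv.1 == k)).map (·.2)

def pvNormalize (u : String) : String :=
  if PySem.Str.startswith u "//" then "https:" ++ u else u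

-- ===== PORT A =====
def parse_srcset (attr : Option String) : List (String × Int) :=
  match attr with
  | none => []
  | some s =>
    if s == "" then []
    else ((PySem.Str.split? s ",").getD []).foldl (fun variants part0 =>
      let part := PySem.Str.strip part0
      if part == "" then variants
      else
        -- part.rsplit(' ', 1): split at the last space (exact: ' ' occurs in part)
        let up :=
          if PySem.Str.isIn " " part then
            let i := PySem.Str.rfind part " "
            (PySem.Str.slice part none (some i), PySem.Str.slice part (some (i+1)) none)
          else (part, "")
        let url_part := PySem.Str.strip up.1
        let width : Int :=
          if PySem.Str.endswith up.2 "w" then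
            (PySem.Int.ofStr? (PySem.Str.slice up.2 none (some (-1)))).getD 0
          else 0
        variants ++ [(pvNormalize url_part, width)]) []

def choose_best_variant (img_tag : List (String × String)) : String :=
  let srcset : Option String :=   -- img_tag.get('srcset') or img_tag.get('dt')
    match pvGet img_tag "srcset" with
    | some s => if s == "" then pvGet img_tag "dt" else some s
    | none => pvGet img_tag "dt"
  let variants := parse_srcset srcset
  -- variants.sort(key=λx: x[1], reverse=True); return variants[0][0]  (empty ⇒ fallback to src)
  match PySem.List.sorted variants (fun x => x.2) true with
  | (u, _) :: _ => u
  | [] =>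
    match pvGet img_tag "src" with
    | none => ""
    | some src => if src == "" then "" else pvNormalize src

def extract_img_sources (img_tag : List (String × String)) (high_res : Bool) : List String :=
  let candidates : List String :=
    if high_res then
      let best := choose_best_variant img_tag
      if best == "" then [] else [best]
    else []
  let candidates := ["src", "data-src", "data-msrc", "d-src"].foldl (fun cands attr =>
      match pvGet img_tag attr with
      | some val => if val == "" then cands else cands ++ [pvNormalize val]
      | none => cands) candidates
  (candidates.foldl (fun (st : PySem.Set String × List String) c =>
      if PySem.Str.startswith c "data:" then st
      else if st.1.contains c then st
      else (st.1.add c, st.2 ++ [c])) (PySem.Set.empty, [])).2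

-- ===== PORT B =====
def pvParsePart (raw : String) : Option (String × Int) :=
  let part := PySem.Str.strip raw
  if part == "" then none
  else
    let up :=
      if PySem.Str.isIn " " part then
        let i := PySem.Str.rfind part " "
        (PySem.Str.slice part none (some i), PySem.Str.slice part (some (i+1)) none)
      else (part, "")
    let width : Int :=
      if PySem.Str.endswith up.2 "w" then
        (PySem.Int.ofStr? (PySem.Str.slice up.2 none (some (-1)))).getD 0
      else 0
    some (pvNormalize (PySem.Str.strip up.1), width)

def pvBestVariant (img_tag : List (String × String)) : String :=
  let attr : Option String :=
    match pvGet img_tag "srcset" with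
    | some s => if s == "" then pvGet img_tag "dt" else some s
    | none => pvGet img_tag "dt"
  let best : Option (String × Int) :=
    match attr with
    | none => none
    | some s =>
      if s == "" then none
      else ((PySem.Str.split? s ",").getD []).foldl (fun best raw =>
        match pvParsePart raw with
        | none => best
        | some v =>
          match best with
          | none => some v
          | some b => if b.2 < v.2 then some v else some b) none
  match best with
  | some b => b.1
  | none =>
    match pvGet img_tag "src" with
    | none => ""
    | some src => if src == "" then "" else pvNormalize src

def extract_img_sources_alt (img_tag : List (String × String)) (high_res : Bool) : List String :=
  let cands : List String := ["src", "data-src", "data-msrc", "d-src"].filterMap (fun a =>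
      (pvGet img_tag a).bind (fun v => if v == "" then none else some (pvNormalize v)))
  let candidates :=
    if high_res then
      let b := pvBestVariant img_tag
      if b == "" then cands else b :: cands
    else cands
  candidates.foldl (fun out c =>
      if !PySem.Str.startswith c "data:" && !out.contains c then out ++ [c] else out) []

-- ===== PRECONDITION & SPEC =====
def Spec_extract_img_sources (img_tag : List (String × String)) (high_res : Bool) (out : List String) : Prop := out = extract_img_sources_alt img_tag high_res
instance (img_tag : List (String × String)) (high_res : Bool) (out : List String) : Decidable (Spec_extract_img_sources img_tag high_res out) := by unfold Spec_extract_img_sources; infer_instance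

-- ===== CLAIM (what is proved, stated in full; the proofs are below) =====
def Claim_equal_extract_img_sources : Prop := ∀ (img_tag : List (String × String)) (high_res : Bool), Dom_extract_img_sources img_tag high_res → Spec_extract_img_sources img_tag high_res (extract_img_sources img_tag high_res)

-- ===== LEMMAS AND PROOFS =====

-- B's running-best step (the body of B's fold)
def pvBestStep (best : Option (String × Int)) (v : String × Int) : Option (String × Int) :=
  match best with
  | none => some v
  | some b => if b.2 < v.2 then some v else some b

theorem parse_srcset_eq_filterMap (s : String) :
    parse_srcset (some s) =
      if s == "" then [] else ((PySem.Str.split? s ",").getD []).filterMap pvParsePart := by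
  unfold parse_srcset
  by_cases hs : s == ""
  · simp [hs]
  · simp only [hs, if_neg, Bool.false_eq_true, not_false_iff]
    have hf : (fun (variants : List (String × Int)) part0 =>
      let part := PySem.Str.strip part0
      if part == "" then variants
      else
        let up :=
          if PySem.Str.isIn " " part then
            let i := PySem.Str.rfind part " "
            (PySem.Str.slice part none (some i), PySem.Str.slice part (some (i+1)) none)
          else (part, "")
        let url_part := PySem.Str.strip up.1
        let width : Int :=
          if PySem.Str.endswith up.2 "w" then
            (PySem.Int.ofStr? (PySem.Str.slice up.2 none (some (-1)))).getD 0
          else 0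
        variants ++ [(pvNormalize url_part, width)]) =
        fun variants part0 => variants ++ (pvParsePart part0).toList := by
      funext variants part0
      simp only [pvParsePart]
      by_cases h : PySem.Str.strip part0 == "" <;> simp [h]
    rw [hf, PySem.List.foldl_append_eq_flatMap, ← List.filterMap_eq_flatMap_toList]
    simp

theorem foldl_best_filterMap (l : List String) (b : Option (String × Int)) :
    l.foldl (fun best raw =>
      match pvParsePart raw with
      | none => best
      | some v =>
        match best with
        | none => some v
        | some b => if b.2 < v.2 then some v else some b) b =
    (l.filterMap pvParsePart).foldl pvBestStep b := by
  induction l generalizing b with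
  | nil => rfl
  | cons x xs ih =>
    simp only [List.foldl_cons, List.filterMap_cons]
    cases h : pvParsePart x with
    | none => exact ih b
    | some v => cases b <;> simp [pvBestStep, ih]

theorem head?_insertBy (v : String × Int) (acc : List (String × Int)) :
    (PySem.List.insertBy (fun a b => decide (b.2 < a.2)) v acc).head? = pvBestStep acc.head? v := by
  cases acc with
  | nil => rfl
  | cons y ys =>
    simp only [PySem.List.insertBy, pvBestStep, List.head?_cons]
    by_cases h : y.2 < v.2 <;> simp [h]

theorem head?_foldl_insertBy (vs : List (String × Int)) (acc : List (String × Int)) :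
    (vs.foldl (fun acc x => PySem.List.insertBy (fun a b => decide (b.2 < a.2)) x acc) acc).head? =
      vs.foldl pvBestStep acc.head? := by
  induction vs generalizing acc with
  | nil => rfl
  | cons v vs ih =>
    simp only [List.foldl_cons]
    rw [ih, head?_insertBy]

theorem head?_sorted_rev_eq_foldl_bestStep (vs : List (String × Int)) :
    (PySem.List.sorted vs (fun x => x.2) true).head? = vs.foldl pvBestStep none := by
  rw [PySem.List.sorted_rev_eq_foldl_insertBy]
  exact head?_foldl_insertBy vs []

theorem best_match_eq (attr : Option String) :
    (match attr with
      | none => (none : Option (String × Int))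
      | some s =>
        if s == "" then none
        else ((PySem.Str.split? s ",").getD []).foldl (fun best raw =>
          match pvParsePart raw with
          | none => best
          | some v =>
            match best with
            | none => some v
            | some b => if b.2 < v.2 then some v else some b) none) =
      (PySem.List.sorted (parse_srcset attr) (fun x => x.2) true).head? := by
  cases attr with
  | none => rfl
  | some s =>
    rw [head?_sorted_rev_eq_foldl_bestStep, parse_srcset_eq_filterMap]
    by_cases hs : s == ""
    · simp [hs]
    · simp only [hs, Bool.false_eq_true, if_false]
      exact foldl_best_filterMap _ none
theorem choose_best_variant_eq (img_tag : List (String × String)) :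
    choose_best_variant img_tag = pvBestVariant img_tag := by
  simp only [choose_best_variant, pvBestVariant]
  generalize (match pvGet img_tag "srcset" with
    | some s => if s == "" then pvGet img_tag "dt" else some s
    | none => pvGet img_tag "dt") = attr
  rw [best_match_eq attr]
  cases PySem.List.sorted (parse_srcset attr) (fun x => x.2) true with
  | cons hd tl => simp
  | nil => simp

theorem candidates_foldl_eq (img_tag : List (String × String)) (attrs : List String)
    (init : List String) :
    attrs.foldl (fun cands attr =>
      match pvGet img_tag attr with
      | some val => if val == "" then cands else cands ++ [pvNormalize val]
      | none => cands) init =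
    init ++ attrs.filterMap (fun a =>
      (pvGet img_tag a).bind (fun v => if v == "" then none else some (pvNormalize v))) := by
  induction attrs generalizing init with
  | nil => simp
  | cons a rest ih =>
    simp only [List.foldl_cons, List.filterMap_cons]
    cases h : pvGet img_tag a with
    | none => simp only [Option.bind]; exact ih init
    | some v =>
      simp only [Option.bind]
      by_cases hv : v == ""
      · rw [if_pos hv, if_pos hv]; exact ih init
      · rw [if_neg hv, if_neg hv, ih]; simp [Option.bind]

theorem dedup_loop_eq (cs : List String) (s : PySem.Set String) (out : List String)
    (h : ∀ x, s.contains x = out.contains x) :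
    (cs.foldl (fun (st : PySem.Set String × List String) c =>
      if PySem.Str.startswith c "data:" then st
      else if st.1.contains c then st
      else (st.1.add c, st.2 ++ [c])) (s, out)).2 =
    cs.foldl (fun out c =>
      if !PySem.Str.startswith c "data:" && !out.contains c then out ++ [c] else out) out := by
  induction cs generalizing s out with
  | nil => rfl
  | cons c rest ih =>
    simp only [List.foldl_cons]
    by_cases hd : PySem.Str.startswith c "data:"
    · simp only [hd, if_pos, Bool.not_true, Bool.false_and]
      simpa using ih s out h
    · simp only [hd, Bool.not_false, Bool.true_and]
      rw [h c]
      by_cases hc : out.contains c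
      · simp only [hc, if_pos, Bool.not_true]
        simpa [hc] using ih s out h
      · simp only [hc]
        have h' : ∀ x, (s.add c).contains x = (out ++ [c]).contains x := by
          intro x
          simp only [PySem.Set.add, PySem.Set.contains] at *
          split <;> simp_all [List.contains_eq_mem]
        simpa [hc] using ih (s.add c) (out ++ [c]) h'

-- ===== VERDICT (by name: the statement is the Claim_ definition above) =====
theorem extract_img_sources_spec : Claim_equal_extract_img_sources := by
  intro img_tag high_res _
  unfold Spec_extract_img_sources
  simp only [extract_img_sources, extract_img_sources_alt]
  rw [candidates_foldl_eq, dedup_loop_eq _ PySem.Set.empty [] (fun x => rfl), choose_best_variant_eq]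
  cases high_res with
  | false => simp
  | true =>
    by_cases hb : pvBestVariant img_tag == "" <;> simp [hb]
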